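-- pv_equiv track=rewrite | github.com/qianlikuaizaifeng-cyx/dmdml | app.py | check_amino_acid_group
-- ===== SOURCE A (Python) =====
-- def check_amino_acid_group(amino_acid_before, amino_acid_after):
--     hydrophobic = {'A', 'V', 'I', 'L', 'M', 'F', 'Y', 'W'}
--     polar = {'S', 'T', 'N', 'Q'}
--     positive = {'K', 'R', 'H'}
--     negative = {'D', 'E'}
--     groups = [hydrophobic, polar, positive, negative]
--
--     for group in groups:
--         if amino_acid_before in group and amino_acid_after in group:
--             return 1  # 同组
--     return 0  # 不同组
-- ===== SOURCE B (Python) =====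
-- # Flat letter->group-id table built once; the check is two dict lookups and a compare.
-- _GROUPS = ('AVILMFYW', 'STNQ', 'KRH', 'DE')
-- GROUP = {}
-- for _i, _g in enumerate(_GROUPS):
--     for _aa in _g:
--         GROUP[_aa] = _i
--
--
-- def check_amino_acid_group(amino_acid_before, amino_acid_after):
--     gid = GROUP.get(amino_acid_before)
--     if gid is None:
--         return 0
--     return 1 if gid == GROUP.get(amino_acid_after) else 0
-- ===== Notes on version B (the rewrite author's own statement) =====
-- stated objective: idiomatic
-- what changed: Replaced the scan over four sets testing both letters per group by a precomputed letter-to-group-id dict and a single lookup-and-compare of the two ids.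
import Mathlib
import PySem

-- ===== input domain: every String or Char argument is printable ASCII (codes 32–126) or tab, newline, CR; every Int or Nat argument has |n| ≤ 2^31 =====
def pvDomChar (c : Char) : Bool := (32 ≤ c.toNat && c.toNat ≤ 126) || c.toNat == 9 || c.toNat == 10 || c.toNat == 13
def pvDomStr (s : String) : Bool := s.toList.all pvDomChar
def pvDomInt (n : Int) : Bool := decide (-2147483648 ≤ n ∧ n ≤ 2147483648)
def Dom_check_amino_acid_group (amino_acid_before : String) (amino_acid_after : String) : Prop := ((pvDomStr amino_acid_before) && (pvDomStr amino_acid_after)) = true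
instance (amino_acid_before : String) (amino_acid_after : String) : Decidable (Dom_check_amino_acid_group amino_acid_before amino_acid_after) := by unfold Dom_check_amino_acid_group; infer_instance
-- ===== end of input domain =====

-- B replaces A's scan over four sets by a precomputed letter->group-id dict and one lookup-and-compare (idiomatic, same O(1) cost).
-- Strings are handled via .toList throughout (String ↔ List Char is exact; sets/dict keys hold single-char strings as one-element char lists).

-- ===== PORT A =====
-- the for-loop over `groups` with early return, as structural recursion
def pvGroupLoop (a b : List Char) : List (PySem.Set (List Char)) → Int
  | [] => 0
  | g :: rest => if g.contains a && g.contains b then 1 else pvGroupLoop a b rest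

def check_amino_acid_group (amino_acid_before : String) (amino_acid_after : String) : Int :=
  let hydrophobic : PySem.Set (List Char) := PySem.Set.ofList [['A'],['V'],['I'],['L'],['M'],['F'],['Y'],['W']]
  let polar : PySem.Set (List Char) := PySem.Set.ofList [['S'],['T'],['N'],['Q']]
  let positive : PySem.Set (List Char) := PySem.Set.ofList [['K'],['R'],['H']]
  let negative : PySem.Set (List Char) := PySem.Set.ofList [['D'],['E']]
  let groups := [hydrophobic, polar, positive, negative]
  pvGroupLoop amino_acid_before.toList amino_acid_after.toList groups

-- ===== PORT B =====
-- module-level table: for i, g in enumerate(_GROUPS): for aa in g: GROUP[aa] = i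
def pvGROUP : PySem.Dict (List Char) Int :=
  (PySem.List.enumerate [['A','V','I','L','M','F','Y','W'], ['S','T','N','Q'], ['K','R','H'], ['D','E']]).foldl
    (fun d p => p.2.foldl (fun d c => d.insert [c] p.1) d)
    PySem.Dict.empty

def check_amino_acid_group_alt (amino_acid_before : String) (amino_acid_after : String) : Int :=
  match pvGROUP.get? amino_acid_before.toList with
  | none => 0
  | some gid => if (some gid == pvGROUP.get? amino_acid_after.toList) then 1 else 0

-- ===== PRECONDITION & SPEC =====
def Spec_check_amino_acid_group (amino_acid_before : String) (amino_acid_after : String) (out : Int) : Prop := out = check_amino_acid_group_alt amino_acid_before amino_acid_after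
instance (amino_acid_before : String) (amino_acid_after : String) (out : Int) : Decidable (Spec_check_amino_acid_group amino_acid_before amino_acid_after out) := by unfold Spec_check_amino_acid_group; infer_instance

-- ===== CLAIM (what is proved, stated in full; the proofs are below) =====
def Claim_equal_check_amino_acid_group : Prop := ∀ (amino_acid_before : String) (amino_acid_after : String), Dom_check_amino_acid_group amino_acid_before amino_acid_after → Spec_check_amino_acid_group amino_acid_before amino_acid_after (check_amino_acid_group amino_acid_before amino_acid_after)

-- ===== LEMMAS AND PROOFS =====
-- the 17 amino-acid letters (as one-element char lists) that occur in either program's tables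
def pvAll : List (List Char) :=
  [['A'],['V'],['I'],['L'],['M'],['F'],['Y'],['W'],['S'],['T'],['N'],['Q'],['K'],['R'],['H'],['D'],['E']]

-- B's dict lookup, written out as the chain of key tests its nested inserts produce
theorem get?_pvGROUP (x : List Char) : pvGROUP.get? x = if x = ['E'] then some 3 else (if x = ['D'] then some 3 else (if x = ['H'] then some 2 else (if x = ['R'] then some 2 else (if x = ['K'] then some 2 else (if x = ['Q'] then some 1 else (if x = ['N'] then some 1 else (if x = ['T'] then some 1 else (if x = ['S'] then some 1 else (if x = ['W'] then some 0 else (if x = ['Y'] then some 0 else (if x = ['F'] then some 0 else (if x = ['M'] then some 0 else (if x = ['L'] then some 0 else (if x = ['I'] then some 0 else (if x = ['V'] then some 0 else (if x = ['A'] then some 0 else (none))))))))))))))))) := by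
  simp only [pvGROUP, PySem.List.enumerate, List.foldl, PySem.Dict.get?_insert, PySem.Dict.get?_empty]
  norm_num

-- ===== VERDICT (by name: the statement is the Claim_ definition above) =====
theorem check_amino_acid_group_spec : Claim_equal_check_amino_acid_group := by
  intro a b _
  unfold Spec_check_amino_acid_group check_amino_acid_group check_amino_acid_group_alt
  generalize a.toList = x
  generalize b.toList = y
  rw [get?_pvGROUP, get?_pvGROUP]
  by_cases hx : x ∈ pvAll <;> by_cases hy : y ∈ pvAll
  · fin_cases hx <;> fin_cases hy <;> decide
  · simp only [pvAll, List.mem_cons, List.not_mem_nil, or_false, not_or] at hy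
    obtain ⟨g1,g2,g3,g4,g5,g6,g7,g8,g9,g10,g11,g12,g13,g14,g15,g16,g17⟩ := hy
    fin_cases hx <;>
      simp_all [pvGroupLoop, PySem.Set.ofList]
  · simp only [pvAll, List.mem_cons, List.not_mem_nil, or_false, not_or] at hx
    obtain ⟨h1,h2,h3,h4,h5,h6,h7,h8,h9,h10,h11,h12,h13,h14,h15,h16,h17⟩ := hx
    fin_cases hy <;>
      simp_all [pvGroupLoop, PySem.Set.ofList]
  · simp only [pvAll, List.mem_cons, List.not_mem_nil, or_false, not_or] at hx hy
    obtain ⟨h1,h2,h3,h4,h5,h6,h7,h8,h9,h10,h11,h12,h13,h14,h15,h16,h17⟩ := hx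
    obtain ⟨g1,g2,g3,g4,g5,g6,g7,g8,g9,g10,g11,g12,g13,g14,g15,g16,g17⟩ := hy
    simp_all [pvGroupLoop, PySem.Set.ofList]
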